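-- pv_equiv track=rewrite | github.com/liam-gb/taro | training/data/batches_expanded/process_batch_0031.py | get_card_element
-- ===== SOURCE A (Python) =====
-- def get_card_element(card):
--     """Determine the element of a card."""
--     name = card['clean_name'].lower()
--     if 'wands' in name:
--         return 'Fire'
--     elif 'cups' in name:
--         return 'Water'
--     elif 'swords' in name:
--         return 'Air'
--     elif 'pentacles' in name:
--         return 'Earth'
--     elif any(m in name for m in ['emperor', 'tower', 'sun', 'strength', 'chariot', 'wheel', 'magician']):
--         return 'Fire'
--     elif any(m in name for m in ['empress', 'world', 'hierophant', 'devil', 'hermit']):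
--         return 'Earth'
--     elif any(m in name for m in ['high priestess', 'hanged man', 'moon', 'death', 'star']):
--         return 'Water'
--     else:
--         return 'Air'
-- ===== SOURCE B (Python) =====
-- # B: order-independent min-priority selection — scan every keyword once,
-- # keep the lowest-rank match, instead of A's prioritized early-return chain.
-- _KEYWORD_RANKS = {
--     'wands': (0, 'Fire'),
--     'cups': (1, 'Water'),
--     'swords': (2, 'Air'),
--     'pentacles': (3, 'Earth'),
--     'emperor': (4, 'Fire'), 'tower': (4, 'Fire'), 'sun': (4, 'Fire'),
--     'strength': (4, 'Fire'), 'chariot': (4, 'Fire'), 'wheel': (4, 'Fire'),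
--     'magician': (4, 'Fire'),
--     'empress': (5, 'Earth'), 'world': (5, 'Earth'), 'hierophant': (5, 'Earth'),
--     'devil': (5, 'Earth'), 'hermit': (5, 'Earth'),
--     'high priestess': (6, 'Water'), 'hanged man': (6, 'Water'),
--     'moon': (6, 'Water'), 'death': (6, 'Water'), 'star': (6, 'Water'),
-- }
--
-- def get_card_element(card):
--     """Determine the element of a card."""
--     name = card['clean_name'].lower()
--     best = None
--     for kw, (rank, element) in _KEYWORD_RANKS.items():
--         if kw in name and (best is None or rank < best[0]):
--             best = (rank, element)
--     return 'Air' if best is None else best[1]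
-- ===== Notes on version B (the rewrite author's own statement) =====
-- stated objective: alternative
-- what changed: B replaces A's prioritized early-return if/elif chain by a single order-independent pass over all keywords that keeps the minimum-rank match and returns its element (a min-reduction instead of first-match short-circuiting).
import Mathlib
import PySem

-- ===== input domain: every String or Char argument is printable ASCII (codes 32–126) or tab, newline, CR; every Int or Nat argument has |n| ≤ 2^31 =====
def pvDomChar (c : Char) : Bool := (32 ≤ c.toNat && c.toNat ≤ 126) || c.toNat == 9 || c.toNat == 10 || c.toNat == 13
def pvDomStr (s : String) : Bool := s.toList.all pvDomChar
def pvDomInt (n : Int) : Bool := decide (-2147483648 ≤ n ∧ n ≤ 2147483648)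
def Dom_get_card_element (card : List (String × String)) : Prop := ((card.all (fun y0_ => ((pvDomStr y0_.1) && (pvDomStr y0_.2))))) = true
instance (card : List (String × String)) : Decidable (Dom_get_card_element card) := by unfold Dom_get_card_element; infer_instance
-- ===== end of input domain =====

-- ===== PORT A =====
-- A: dict lookup (KeyError excluded by Pre_), lowercase once, prioritized if/elif substring chain.
def get_card_element (card : List (String × String)) : String :=
  match PySem.Dict.get? (PySem.Dict.mk card) "clean_name" with
  | none => ""   -- Python raises KeyError here; excluded by Pre_get_card_element
  | some s =>
    let name := PySem.Str.lower s
    if PySem.Str.isIn "wands" name then "Fire"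
    else if PySem.Str.isIn "cups" name then "Water"
    else if PySem.Str.isIn "swords" name then "Air"
    else if PySem.Str.isIn "pentacles" name then "Earth"
    else if (["emperor","tower","sun","strength","chariot","wheel","magician"] : List String).any (fun m => PySem.Str.isIn m name) then "Fire"
    else if (["empress","world","hierophant","devil","hermit"] : List String).any (fun m => PySem.Str.isIn m name) then "Earth"
    else if (["high priestess","hanged man","moon","death","star"] : List String).any (fun m => PySem.Str.isIn m name) then "Water"
    else "Air"

-- ===== PORT B =====
-- B: one pass over all (keyword, rank, element) entries keeping the minimum-rank match.
def pvKeywordRanks : List (String × Int × String) :=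
  [("wands", (0, "Fire")),
   ("cups", (1, "Water")),
   ("swords", (2, "Air")),
   ("pentacles", (3, "Earth")),
   ("emperor", (4, "Fire")), ("tower", (4, "Fire")), ("sun", (4, "Fire")),
   ("strength", (4, "Fire")), ("chariot", (4, "Fire")), ("wheel", (4, "Fire")),
   ("magician", (4, "Fire")),
   ("empress", (5, "Earth")), ("world", (5, "Earth")), ("hierophant", (5, "Earth")),
   ("devil", (5, "Earth")), ("hermit", (5, "Earth")),
   ("high priestess", (6, "Water")), ("hanged man", (6, "Water")),
   ("moon", (6, "Water")), ("death", (6, "Water")), ("star", (6, "Water"))]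

def pvBestStep (name : String) (best : Option (Int × String)) (e : String × Int × String) : Option (Int × String) :=
  if PySem.Str.isIn e.1 name && (match best with | none => true | some b => decide (e.2.1 < b.1))
  then some e.2 else best

def get_card_element_alt (card : List (String × String)) : String :=
  match PySem.Dict.get? (PySem.Dict.mk card) "clean_name" with
  | none => ""   -- Python raises KeyError here; excluded by Pre_get_card_element
  | some s =>
    let name := PySem.Str.lower s
    match pvKeywordRanks.foldl (pvBestStep name) none with
    | none => "Air"
    | some b => b.2

-- ===== PRECONDITION & SPEC =====
-- Pre_ excludes exactly the inputs where the Python A raises KeyError: no 'clean_name' key.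
def Pre_get_card_element (card : List (String × String)) : Prop :=
  PySem.Dict.contains (PySem.Dict.mk card) "clean_name" = true
instance (card : List (String × String)) : Decidable (Pre_get_card_element card) := by
  unfold Pre_get_card_element; infer_instance
def pvWitness_get_card_element : (List (String × String)) := [("clean_name", "The Sun")]

def Spec_get_card_element (card : List (String × String)) (out : String) : Prop := out = get_card_element_alt card
instance (card : List (String × String)) (out : String) : Decidable (Spec_get_card_element card out) := by unfold Spec_get_card_element; infer_instance

-- ===== CLAIM (what is proved, stated in full; the proofs are below) =====
def Claim_equal_get_card_element : Prop := ∀ (card : List (String × String)), Dom_get_card_element card → Pre_get_card_element card → Spec_get_card_element card (get_card_element card)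

-- appended below the claim block
-- ===== LEMMAS AND PROOFS =====
-- tier decomposition of the keyword table
def pvT1 : List (String × Int × String) := [("wands", (0, "Fire"))]
def pvT2 : List (String × Int × String) := [("cups", (1, "Water"))]
def pvT3 : List (String × Int × String) := [("swords", (2, "Air"))]
def pvT4 : List (String × Int × String) := [("pentacles", (3, "Earth"))]
def pvT5 : List (String × Int × String) :=
  [("emperor", (4, "Fire")), ("tower", (4, "Fire")), ("sun", (4, "Fire")),
   ("strength", (4, "Fire")), ("chariot", (4, "Fire")), ("wheel", (4, "Fire")),
   ("magician", (4, "Fire"))]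
def pvT6 : List (String × Int × String) :=
  [("empress", (5, "Earth")), ("world", (5, "Earth")), ("hierophant", (5, "Earth")),
   ("devil", (5, "Earth")), ("hermit", (5, "Earth"))]
def pvT7 : List (String × Int × String) :=
  [("high priestess", (6, "Water")), ("hanged man", (6, "Water")),
   ("moon", (6, "Water")), ("death", (6, "Water")), ("star", (6, "Water"))]

theorem pvKeywordRanks_split :
    pvKeywordRanks = pvT1 ++ (pvT2 ++ (pvT3 ++ (pvT4 ++ (pvT5 ++ (pvT6 ++ pvT7))))) := rfl

-- once the accumulator holds a rank no later entry beats, the fold is constant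
theorem pvFold_stable (name : String) (l : List (String × Int × String)) (r0 : Int) (e0 : String)
    (h : ∀ x ∈ l, r0 ≤ x.2.1) :
    l.foldl (pvBestStep name) (some (r0, e0)) = some (r0, e0) := by
  induction l with
  | nil => rfl
  | cons a t ih =>
    have ha : decide (a.2.1 < r0) = false := decide_eq_false (not_lt.mpr (h a (by simp)))
    have hstep : pvBestStep name (some (r0, e0)) a = some (r0, e0) := by
      simp [pvBestStep, ha]
    rw [List.foldl_cons, hstep]
    exact ih (fun x hx => h x (List.mem_cons_of_mem _ hx))

-- a prefix with no matching keyword is skipped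
theorem pvFold_skip (name : String) (l tail : List (String × Int × String))
    (h : ∀ x ∈ l, PySem.Str.isIn x.1 name = false) :
    (l ++ tail).foldl (pvBestStep name) none = tail.foldl (pvBestStep name) none := by
  induction l with
  | nil => rfl
  | cons a t ih =>
    have hx := h a (by simp)
    simp only [PySem.Str.isIn] at hx
    have hstep : pvBestStep name (none : Option (Int × String)) a = none := by
      simp [pvBestStep, PySem.Str.isIn, hx]
    rw [List.cons_append, List.foldl_cons, hstep]
    exact ih (fun x hx => h x (List.mem_cons_of_mem _ hx))

-- a tier whose entries all carry (r, e), one of which matches, fixes the result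
theorem pvFold_tier (name : String) (l tail : List (String × Int × String)) (r : Int) (e : String)
    (hl : ∀ x ∈ l, x.2 = (r, e))
    (htail : ∀ x ∈ tail, r ≤ x.2.1)
    (hany : l.any (fun x => PySem.Str.isIn x.1 name) = true) :
    (l ++ tail).foldl (pvBestStep name) none = some (r, e) := by
  induction l with
  | nil => simp at hany
  | cons a t ih =>
    by_cases ha : PySem.Str.isIn a.1 name = true
    · have ha2 := ha
      simp only [PySem.Str.isIn] at ha2
      have hstep : pvBestStep name (none : Option (Int × String)) a = some (r, e) := by
        simp [pvBestStep, PySem.Str.isIn, ha2, hl a (by simp)]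
      rw [List.cons_append, List.foldl_cons, hstep]
      refine pvFold_stable name _ r e ?_
      intro x hx
      rcases List.mem_append.mp hx with hx | hx
      · exact le_of_eq (by rw [hl x (List.mem_cons_of_mem _ hx)])
      · exact htail x hx
    · have ha' : PySem.Str.isIn a.1 name = false := by
        cases hb : PySem.Str.isIn a.1 name
        · rfl
        · exact absurd hb ha
      have ha2 := ha'
      simp only [PySem.Str.isIn] at ha2
      have hstep : pvBestStep name (none : Option (Int × String)) a = none := by
        simp [pvBestStep, PySem.Str.isIn, ha2]
      rw [List.cons_append, List.foldl_cons, hstep]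
      refine ih (fun x hx => hl x (List.mem_cons_of_mem _ hx)) ?_
      simpa [List.any_cons, PySem.Str.isIn, ha2] using hany

theorem pvFoldEq (name : String) :
    (match pvKeywordRanks.foldl (pvBestStep name) none with
     | none => "Air"
     | some b => b.2) =
    (if PySem.Str.isIn "wands" name then "Fire"
     else if PySem.Str.isIn "cups" name then "Water"
     else if PySem.Str.isIn "swords" name then "Air"
     else if PySem.Str.isIn "pentacles" name then "Earth"
     else if (["emperor","tower","sun","strength","chariot","wheel","magician"] : List String).any (fun m => PySem.Str.isIn m name) then "Fire"
     else if (["empress","world","hierophant","devil","hermit"] : List String).any (fun m => PySem.Str.isIn m name) then "Earth"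
     else if (["high priestess","hanged man","moon","death","star"] : List String).any (fun m => PySem.Str.isIn m name) then "Water"
     else "Air") := by
  rw [pvKeywordRanks_split]
  by_cases h1 : PySem.Str.isIn "wands" name = true
  · have hC1 := by simpa [PySem.Str.isIn] using h1
    rw [pvFold_tier name pvT1 _ 0 "Fire" (by decide) (by decide) (by simp [pvT1, PySem.Str.isIn, hC1])]
    simp [hC1]
  · have hC1' := by simpa [PySem.Str.isIn] using (eq_false_of_ne_true h1)
    rw [pvFold_skip name pvT1 _ (by simp [pvT1, PySem.Str.isIn, hC1'])]
    by_cases h2 : PySem.Str.isIn "cups" name = true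
    · have hC2 := by simpa [PySem.Str.isIn] using h2
      rw [pvFold_tier name pvT2 _ 1 "Water" (by decide) (by decide) (by simp [pvT2, PySem.Str.isIn, hC2])]
      simp [hC1', hC2]
    · have hC2' := by simpa [PySem.Str.isIn] using (eq_false_of_ne_true h2)
      rw [pvFold_skip name pvT2 _ (by simp [pvT2, PySem.Str.isIn, hC2'])]
      by_cases h3 : PySem.Str.isIn "swords" name = true
      · have hC3 := by simpa [PySem.Str.isIn] using h3
        rw [pvFold_tier name pvT3 _ 2 "Air" (by decide) (by decide) (by simp [pvT3, PySem.Str.isIn, hC3])]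
        simp [hC1', hC2', hC3]
      · have hC3' := by simpa [PySem.Str.isIn] using (eq_false_of_ne_true h3)
        rw [pvFold_skip name pvT3 _ (by simp [pvT3, PySem.Str.isIn, hC3'])]
        by_cases h4 : PySem.Str.isIn "pentacles" name = true
        · have hC4 := by simpa [PySem.Str.isIn] using h4
          rw [pvFold_tier name pvT4 _ 3 "Earth" (by decide) (by decide) (by simp [pvT4, PySem.Str.isIn, hC4])]
          simp [hC1', hC2', hC3', hC4]
        · have hC4' := by simpa [PySem.Str.isIn] using (eq_false_of_ne_true h4)
          rw [pvFold_skip name pvT4 _ (by simp [pvT4, PySem.Str.isIn, hC4'])]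
          by_cases h5 : (pvT5.any (fun x => PySem.Str.isIn x.1 name)) = true
          · have hC5 := by simpa [pvT5, PySem.Str.isIn] using h5
            rw [pvFold_tier name pvT5 _ 4 "Fire" (by decide) (by decide) h5]
            simp [hC1', hC2', hC3', hC4', hC5]
          · have h5x : ∀ x ∈ pvT5, PySem.Str.isIn x.1 name = false := by
              intro x hx
              cases hb : PySem.Str.isIn x.1 name
              · rfl
              · exact absurd (List.any_eq_true.mpr ⟨x, hx, hb⟩) h5
            rw [pvFold_skip name pvT5 _ h5x]
            have hC5' := by simpa [pvT5, PySem.Str.isIn] using h5x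
            by_cases h6 : (pvT6.any (fun x => PySem.Str.isIn x.1 name)) = true
            · have hC6 := by simpa [pvT6, PySem.Str.isIn] using h6
              rw [pvFold_tier name pvT6 _ 5 "Earth" (by decide) (by decide) h6]
              simp [hC1', hC2', hC3', hC4', hC5', hC6]
            · have h6x : ∀ x ∈ pvT6, PySem.Str.isIn x.1 name = false := by
                intro x hx
                cases hb : PySem.Str.isIn x.1 name
                · rfl
                · exact absurd (List.any_eq_true.mpr ⟨x, hx, hb⟩) h6
              rw [pvFold_skip name pvT6 _ h6x]
              have hC6' := by simpa [pvT6, PySem.Str.isIn] using h6x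
              by_cases h7 : (pvT7.any (fun x => PySem.Str.isIn x.1 name)) = true
              · have hC7 := by simpa [pvT7, PySem.Str.isIn] using h7
                rw [show (pvT7 : List (String × Int × String)) = pvT7 ++ [] by simp,
                    pvFold_tier name pvT7 [] 6 "Water" (by decide) (by simp) h7]
                simp [hC1', hC2', hC3', hC4', hC5', hC6', hC7]
              · have h7x : ∀ x ∈ pvT7, PySem.Str.isIn x.1 name = false := by
                  intro x hx
                  cases hb : PySem.Str.isIn x.1 name
                  · rfl
                  · exact absurd (List.any_eq_true.mpr ⟨x, hx, hb⟩) h7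
                rw [show (pvT7 : List (String × Int × String)) = pvT7 ++ [] by simp, pvFold_skip name pvT7 [] h7x]
                have hC7' := by simpa [pvT7, PySem.Str.isIn] using h7x
                simp [hC1', hC2', hC3', hC4', hC5', hC6', hC7', List.foldl]

-- ===== VERDICT (by name: the statement is the Claim_ definition above) =====
theorem get_card_element_spec : Claim_equal_get_card_element := by
  intro card _ _
  unfold Spec_get_card_element get_card_element get_card_element_alt
  cases PySem.Dict.get? (PySem.Dict.mk card) "clean_name" with
  | none => rfl
  | some s => exact (pvFoldEq (PySem.Str.lower s)).symm
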